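-- pv_equiv track=rewrite | github.com/tcorrin/advent_of_code_2020 | day24/24.py | check_adjacent_tiles
-- ===== SOURCE A (Python) =====
-- def check_adjacent_tiles(tile, tiles):
--   x = tile[0]
--   y = tile[1]
--   z = tile[2]
--   colour = tile[3]
--   new_colour = colour
--   adjacent_tiles = [(0,1,-1),(1,0,-1),(-1,0,1),(0,-1,1),(-1,1,0),(1,-1,0)]
--   black = 0
--   white = 0
--   for at in adjacent_tiles:
--     new_x = x + at[0]
--     new_y = y + at[1]
--     new_z = z + at[2]
--     for t in tiles:
--       if t[0] == new_x and t[1] == new_y and t[2] == new_z: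
--         if t[3] == "white":
--           white += 1
--         elif t[3] == "black":
--           black += 1
--   if colour == "black" and (black == 0 or black > 2):
--     new_colour = "white"
--   elif colour == "white" and black == 2:
--     new_colour = "black"
--   return new_colour
-- ===== SOURCE B (Python) =====
-- def check_adjacent_tiles(tile, tiles):
--   x, y, z, colour = tile[0], tile[1], tile[2], tile[3]
--   offsets = {(0, 1, -1), (1, 0, -1), (-1, 0, 1), (0, -1, 1), (-1, 1, 0), (1, -1, 0)}
--   black = 0
--   for t in tiles:
--     if (t[0] - x, t[1] - y, t[2] - z) in offsets and t[3] == "black":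
--       black += 1
--   if colour == "black" and (black == 0 or black > 2):
--     return "white"
--   if colour == "white" and black == 2:
--     return "black"
--   return colour
-- ===== Notes on version B (the rewrite author's own statement) =====
-- stated objective: alternative
-- what changed: Replaces A's 6-offset outer loop each rescanning all tiles (and its unused white counter) with one single pass over tiles that tests each tile's delta against a set of the six neighbour offsets, counting only black neighbours; duplicate tiles still double-count because each tile's delta matches at most one offset.
import Mathlib
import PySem

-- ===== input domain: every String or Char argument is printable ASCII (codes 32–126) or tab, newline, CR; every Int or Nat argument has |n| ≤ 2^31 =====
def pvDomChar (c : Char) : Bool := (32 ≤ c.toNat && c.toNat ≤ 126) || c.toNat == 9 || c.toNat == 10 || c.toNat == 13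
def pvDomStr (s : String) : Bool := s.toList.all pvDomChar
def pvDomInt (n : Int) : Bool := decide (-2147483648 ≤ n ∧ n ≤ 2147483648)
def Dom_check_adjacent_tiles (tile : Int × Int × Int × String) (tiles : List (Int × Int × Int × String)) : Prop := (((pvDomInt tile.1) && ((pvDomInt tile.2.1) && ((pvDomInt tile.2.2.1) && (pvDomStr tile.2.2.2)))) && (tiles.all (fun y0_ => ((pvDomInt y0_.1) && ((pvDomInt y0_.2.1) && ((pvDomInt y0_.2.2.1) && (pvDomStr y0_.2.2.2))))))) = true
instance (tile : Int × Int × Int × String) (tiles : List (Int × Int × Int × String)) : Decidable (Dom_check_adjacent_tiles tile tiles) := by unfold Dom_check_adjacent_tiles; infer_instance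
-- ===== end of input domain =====

-- B replaces A's 6-offset outer loop that rescans all tiles with a single pass over tiles
-- testing each tile's delta against a set of the six neighbour offsets (objective: alternative).

-- ===== PORT A =====
def check_adjacent_tiles (tile : Int × Int × Int × String) (tiles : List (Int × Int × Int × String)) : String :=
  let x := tile.1
  let y := tile.2.1
  let z := tile.2.2.1
  let colour := tile.2.2.2
  let adjacent_tiles : List (Int × Int × Int) := [(0,1,-1),(1,0,-1),(-1,0,1),(0,-1,1),(-1,1,0),(1,-1,0)]
  -- state (black, white), updated exactly as A's nested loops do
  let s := adjacent_tiles.foldl (fun (s : Int × Int) at_ =>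
    let new_x := x + at_.1
    let new_y := y + at_.2.1
    let new_z := z + at_.2.2
    tiles.foldl (fun (s : Int × Int) t =>
      if t.1 = new_x ∧ t.2.1 = new_y ∧ t.2.2.1 = new_z then
        if t.2.2.2 = "white" then (s.1, s.2 + 1)
        else if t.2.2.2 = "black" then (s.1 + 1, s.2)
        else s
      else s) s) (0, 0)
  let black := s.1
  if colour = "black" ∧ (black = 0 ∨ black > 2) then "white"
  else if colour = "white" ∧ black = 2 then "black"
  else colour

-- ===== PORT B =====
def pvOffsets : PySem.Set (Int × Int × Int) :=
  PySem.Set.ofList [(0,1,-1),(1,0,-1),(-1,0,1),(0,-1,1),(-1,1,0),(1,-1,0)]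

def check_adjacent_tiles_alt (tile : Int × Int × Int × String) (tiles : List (Int × Int × Int × String)) : String :=
  let x := tile.1
  let y := tile.2.1
  let z := tile.2.2.1
  let colour := tile.2.2.2
  let black := tiles.foldl (fun (b : Int) t =>
    if (t.1 - x, t.2.1 - y, t.2.2.1 - z) ∈ pvOffsets ∧ t.2.2.2 = "black" then b + 1 else b) 0
  if colour = "black" ∧ (black = 0 ∨ black > 2) then "white"
  else if colour = "white" ∧ black = 2 then "black"
  else colour

-- ===== PRECONDITION & SPEC =====
def Spec_check_adjacent_tiles (tile : Int × Int × Int × String) (tiles : List (Int × Int × Int × String)) (out : String) : Prop := out = check_adjacent_tiles_alt tile tiles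
instance (tile : Int × Int × Int × String) (tiles : List (Int × Int × Int × String)) (out : String) : Decidable (Spec_check_adjacent_tiles tile tiles out) := by unfold Spec_check_adjacent_tiles; infer_instance

-- ===== CLAIM (what is proved, stated in full; the proofs are below) =====
def Claim_equal_check_adjacent_tiles : Prop := ∀ (tile : Int × Int × Int × String) (tiles : List (Int × Int × Int × String)), Dom_check_adjacent_tiles tile tiles → Spec_check_adjacent_tiles tile tiles (check_adjacent_tiles tile tiles)

-- ===== LEMMAS AND PROOFS =====

/-- number of tiles at exactly (nx,ny,nz) coloured "black" -/
def cntB (nx ny nz : Int) : List (Int × Int × Int × String) → Int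
  | [] => 0
  | t :: ts => (if t.1 = nx ∧ t.2.1 = ny ∧ t.2.2.1 = nz ∧ t.2.2.2 = "black" then 1 else 0) + cntB nx ny nz ts

/-- number of tiles at exactly (nx,ny,nz) coloured "white" -/
def cntW (nx ny nz : Int) : List (Int × Int × Int × String) → Int
  | [] => 0
  | t :: ts => (if t.1 = nx ∧ t.2.1 = ny ∧ t.2.2.1 = nz ∧ t.2.2.2 = "white" then 1 else 0) + cntW nx ny nz ts

/-- number of black tiles whose delta from (x,y,z) is one of the six offsets -/
def cntAlt (x y z : Int) : List (Int × Int × Int × String) → Int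
  | [] => 0
  | t :: ts => (if (t.1 - x, t.2.1 - y, t.2.2.1 - z) ∈ pvOffsets ∧ t.2.2.2 = "black" then 1 else 0) + cntAlt x y z ts

theorem inner_eq (nx ny nz : Int) (ts : List (Int × Int × Int × String)) :
    ∀ (b w : Int),
    ts.foldl (fun (s : Int × Int) t =>
      if t.1 = nx ∧ t.2.1 = ny ∧ t.2.2.1 = nz then
        if t.2.2.2 = "white" then (s.1, s.2 + 1)
        else if t.2.2.2 = "black" then (s.1 + 1, s.2)
        else s
      else s) (b, w) = (b + cntB nx ny nz ts, w + cntW nx ny nz ts) := by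
  induction ts with
  | nil => intro b w; simp [cntB, cntW]
  | cons t ts ih =>
    intro b w
    simp only [List.foldl_cons, cntB, cntW]
    split_ifs <;> simp_all <;> omega

theorem alt_eq (x y z : Int) (ts : List (Int × Int × Int × String)) :
    ∀ (b : Int),
    ts.foldl (fun (b : Int) t =>
      if (t.1 - x, t.2.1 - y, t.2.2.1 - z) ∈ pvOffsets ∧ t.2.2.2 = "black" then b + 1 else b) b
    = b + cntAlt x y z ts := by
  induction ts with
  | nil => intro b; simp [cntAlt]
  | cons t ts ih =>
    intro b
    simp only [List.foldl_cons, cntAlt]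
    split_ifs <;> simp [ih]; ring

theorem sum6 (x y z : Int) (ts : List (Int × Int × Int × String)) :
    cntB (x + 0) (y + 1) (z + -1) ts + cntB (x + 1) (y + 0) (z + -1) ts
      + cntB (x + -1) (y + 0) (z + 1) ts + cntB (x + 0) (y + -1) (z + 1) ts
      + cntB (x + -1) (y + 1) (z + 0) ts + cntB (x + 1) (y + -1) (z + 0) ts
    = cntAlt x y z ts := by
  induction ts with
  | nil => simp [cntB, cntAlt]
  | cons t ts ih =>
    simp only [cntB, cntAlt]
    by_cases hb : t.2.2.2 = "black"
    · have hofl : pvOffsets = [(0,1,-1),(1,0,-1),(-1,0,1),(0,-1,1),(-1,1,0),(1,-1,0)] := by decide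
      simp only [hb, and_true, hofl, List.mem_cons, List.not_mem_nil, or_false, Prod.mk.injEq]
      split_ifs <;> omega
    · simp only [hb, and_false, if_false]
      omega

-- ===== VERDICT (by name: the statement is the Claim_ definition above) =====
theorem check_adjacent_tiles_spec : Claim_equal_check_adjacent_tiles := by
  intro tile tiles _
  obtain ⟨x, y, z, colour⟩ := tile
  unfold Spec_check_adjacent_tiles check_adjacent_tiles check_adjacent_tiles_alt
  simp only [List.foldl_cons, List.foldl_nil, inner_eq, alt_eq]
  have h := sum6 x y z tiles
  have hb : (0 : Int) + cntB (x + 0) (y + 1) (z + -1) tiles + cntB (x + 1) (y + 0) (z + -1) tiles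
      + cntB (x + -1) (y + 0) (z + 1) tiles + cntB (x + 0) (y + -1) (z + 1) tiles
      + cntB (x + -1) (y + 1) (z + 0) tiles + cntB (x + 1) (y + -1) (z + 0) tiles
    = 0 + cntAlt x y z tiles := by omega
  rw [hb]
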